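-- pv_equiv track=rewrite | github.com/ronspeedster/phd_cqu | concensus_hiv_data_scripts/02_hypermut3.py | count_monomer_mutations
-- ===== SOURCE A (Python) =====
-- MONOMER_MUTATION_COLUMNS: list[str] = (
--     ["consensus_A_count", "consensus_G_count", "consensus_C_count", "consensus_T_count"]
--     + [f"{a}_to_{b}" for a in "ACGT" for b in "ACGT" if a != b]
-- )
--
-- def count_monomer_mutations(consensus: str, query: str) -> dict[str, int]:
--     counts: dict[str, int] = {col: 0 for col in MONOMER_MUTATION_COLUMNS}
--     for c_base, q_base in zip(consensus.upper(), query.upper()):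
--         if c_base == "-" and q_base == "-":
--             continue
--         if c_base in "ACGT":
--             counts[f"consensus_{c_base}_count"] += 1
--             if q_base in "ACGT" and c_base != q_base:
--                 counts[f"{c_base}_to_{q_base}"] += 1
--     return counts
-- ===== SOURCE B (Python) =====
-- def count_monomer_mutations(consensus: str, query: str) -> dict[str, int]:
--     # Tabulate every aligned (consensus, query) base pair once, then read the
--     # 16 output columns off the table by looping over the fixed alphabet.
--     tally: dict[tuple[str, str], int] = {}
--     for pair in zip(consensus.upper(), query.upper()):
--         tally[pair] = tally.get(pair, 0) + 1
--     result: dict[str, int] = {}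
--     for x in "AGCT":
--         result[f"consensus_{x}_count"] = sum(v for (c, q), v in tally.items() if c == x)
--     for x in "ACGT":
--         for y in "ACGT":
--             if x != y:
--                 result[f"{x}_to_{y}"] = tally.get((x, y), 0)
--     return result
-- ===== Notes on version B (the rewrite author's own statement) =====
-- stated objective: alternative
-- what changed: Instead of updating 16 named counters per aligned position with branching, B tabulates every (consensus, query) base pair into one tally dict in a single pass and then assembles the 16 output columns by looping over the fixed ACGT alphabet (summing tally rows for consensus counts, direct lookups for substitution counts).
import Mathlib
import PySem

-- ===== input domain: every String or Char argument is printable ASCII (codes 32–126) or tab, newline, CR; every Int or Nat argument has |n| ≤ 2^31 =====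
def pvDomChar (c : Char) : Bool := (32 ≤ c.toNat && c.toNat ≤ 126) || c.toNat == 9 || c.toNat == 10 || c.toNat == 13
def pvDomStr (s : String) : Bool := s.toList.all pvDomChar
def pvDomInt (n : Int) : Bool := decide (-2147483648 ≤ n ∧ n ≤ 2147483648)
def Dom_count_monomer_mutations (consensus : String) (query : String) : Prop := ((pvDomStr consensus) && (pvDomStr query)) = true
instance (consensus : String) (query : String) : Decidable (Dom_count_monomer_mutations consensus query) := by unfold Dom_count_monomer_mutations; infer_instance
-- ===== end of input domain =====

-- B tabulates all aligned base pairs once and reads the 16 columns off the table by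
-- looping over the fixed alphabet (objective: alternative decomposition, same cost).

-- shared helper: the f-string key names, ported as explicit char-list concatenation (exact)
def pvConsKey (c : Char) : String := String.ofList ("consensus_".toList ++ [c] ++ "_count".toList)
def pvMutKey (a b : Char) : String := String.ofList ([a] ++ "_to_".toList ++ [b])

-- module-level MONOMER_MUTATION_COLUMNS
def pvMonomerMutationColumns : List String :=
  ["consensus_A_count", "consensus_G_count", "consensus_C_count", "consensus_T_count"]
    ++ "ACGT".toList.flatMap (fun a =>
         "ACGT".toList.filterMap (fun b => if a ≠ b then some (pvMutKey a b) else none))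

-- ===== PORT A =====
def count_monomer_mutations (consensus : String) (query : String) : List (String × Int) :=
  let counts : PySem.Dict String Int :=
    pvMonomerMutationColumns.foldl (fun d col => d.insert col 0) PySem.Dict.empty
  let counts :=
    (List.zip (PySem.Str.upper consensus).toList (PySem.Str.upper query).toList).foldl
      (fun d p =>
        if p.1 = '-' ∧ p.2 = '-' then d
        else if PySem.Chars.isIn [p.1] "ACGT".toList then
          -- counts[f"consensus_{c}_count"] += 1 ; the key is always present
          let d1 := d.modify (pvConsKey p.1) 0 (· + 1)
          if PySem.Chars.isIn [p.2] "ACGT".toList ∧ p.1 ≠ p.2 then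
            d1.modify (pvMutKey p.1 p.2) 0 (· + 1)
          else d1
        else d)
      counts
  counts.items

-- ===== PORT B =====
def count_monomer_mutations_alt (consensus : String) (query : String) : List (String × Int) :=
  let tally : PySem.Dict (Char × Char) Int :=
    (List.zip (PySem.Str.upper consensus).toList (PySem.Str.upper query).toList).foldl
      (fun d pair => d.insert pair (d.getD pair 0 + 1)) PySem.Dict.empty
  let result : PySem.Dict String Int :=
    "AGCT".toList.foldl
      (fun r x =>
        r.insert (pvConsKey x)
          (((tally.items.filter (fun e => e.1.1 == x)).map (fun e => e.2)).sum))
      PySem.Dict.empty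
  let result :=
    "ACGT".toList.foldl
      (fun r x =>
        "ACGT".toList.foldl
          (fun r y => if x ≠ y then r.insert (pvMutKey x y) (tally.getD (x, y) 0) else r)
          r)
      result
  result.items

-- ===== PRECONDITION & SPEC =====
def Spec_count_monomer_mutations (consensus : String) (query : String) (out : List (String × Int)) : Prop := out = count_monomer_mutations_alt consensus query
instance (consensus : String) (query : String) (out : List (String × Int)) : Decidable (Spec_count_monomer_mutations consensus query out) := by unfold Spec_count_monomer_mutations; infer_instance

-- ===== CLAIM (what is proved, stated in full; the proofs are below) =====
def Claim_equal_count_monomer_mutations : Prop := ∀ (consensus : String) (query : String), Dom_count_monomer_mutations consensus query → Spec_count_monomer_mutations consensus query (count_monomer_mutations consensus query)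

-- ===== LEMMAS AND PROOFS =====

-- proof-side abbreviations for the pieces of both ports
def pvStepA (d : PySem.Dict String Int) (p : Char × Char) : PySem.Dict String Int :=
  if p.1 = '-' ∧ p.2 = '-' then d
  else if PySem.Chars.isIn [p.1] "ACGT".toList then
    let d1 := d.modify (pvConsKey p.1) 0 (· + 1)
    if PySem.Chars.isIn [p.2] "ACGT".toList ∧ p.1 ≠ p.2 then
      d1.modify (pvMutKey p.1 p.2) 0 (· + 1)
    else d1
  else d

def pvInitA : PySem.Dict String Int :=
  pvMonomerMutationColumns.foldl (fun d col => d.insert col 0) PySem.Dict.empty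

def pvPairs12 : List (Char × Char) :=
  [('A','C'),('A','G'),('A','T'),('C','A'),('C','G'),('C','T'),
   ('G','A'),('G','C'),('G','T'),('T','A'),('T','C'),('T','G')]

-- the common value of both ports, per column
def pvCanon (L : List (Char × Char)) : List (String × Int) :=
  [("consensus_A_count", (L.countP (fun p => p.1 == 'A') : Int)),
   ("consensus_G_count", (L.countP (fun p => p.1 == 'G') : Int)),
   ("consensus_C_count", (L.countP (fun p => p.1 == 'C') : Int)),
   ("consensus_T_count", (L.countP (fun p => p.1 == 'T') : Int))]
  ++ pvPairs12.map (fun xy => (pvMutKey xy.1 xy.2, (List.count xy L : Int)))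

theorem consKey_eq_consKey_iff (a b : Char) : pvConsKey a = pvConsKey b ↔ a = b := by
  constructor
  · intro h; have h2 := congrArg String.toList h; simp [pvConsKey] at h2; exact h2
  · intro h; rw [h]

theorem mutKey_eq_mutKey_iff (a b c d : Char) : pvMutKey a b = pvMutKey c d ↔ a = c ∧ b = d := by
  constructor
  · intro h; have h2 := congrArg String.toList h; simp [pvMutKey] at h2; exact h2
  · rintro ⟨rfl, rfl⟩; rfl

theorem consKey_eq_mutKey_iff (a b c : Char) : pvConsKey a = pvMutKey b c ↔ False := by
  simp only [iff_false]
  intro h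
  have h2 := congrArg (fun s => s.toList.length) h
  simp [pvConsKey, pvMutKey] at h2

theorem mutKey_eq_consKey_iff (a b c : Char) : pvMutKey b c = pvConsKey a ↔ False := by
  simp only [iff_false]
  intro h
  exact (consKey_eq_mutKey_iff a b c).mp h.symm

theorem isIn_singleton (c : Char) (l : List Char) : PySem.Chars.isIn [c] l = true ↔ c ∈ l := by
  rw [PySem.Chars.isIn_iff_infix]; exact List.singleton_infix_iff c l

theorem stepA_getD_cons (X : Char) (hX : X ∈ (['A','C','G','T'] : List Char))
    (d : PySem.Dict String Int) (p : Char × Char) :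
    (pvStepA d p).getD (pvConsKey X) 0
      = d.getD (pvConsKey X) 0 + (if p.1 = X then 1 else 0) := by
  obtain ⟨c, q⟩ := p
  have hXd : X ≠ '-' := by rintro rfl; simp at hX
  unfold pvStepA
  dsimp only
  by_cases h1 : c = '-' ∧ q = '-'
  · rw [if_pos h1]
    obtain ⟨rfl, rfl⟩ := h1
    rw [if_neg (fun h : '-' = X => hXd h.symm), add_zero]
  · rw [if_neg h1]
    by_cases h2 : PySem.Chars.isIn [c] "ACGT".toList = true
    · rw [if_pos h2]
      by_cases h3 : PySem.Chars.isIn [q] "ACGT".toList = true ∧ c ≠ q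
      · rw [if_pos h3]
        simp only [PySem.Dict.getD_modify, consKey_eq_mutKey_iff, if_false,
          consKey_eq_consKey_iff]
        by_cases hcX : c = X
        · subst hcX; simp
        · rw [if_neg (fun h => hcX h.symm), if_neg hcX, add_zero]
      · rw [if_neg h3]
        simp only [PySem.Dict.getD_modify, consKey_eq_consKey_iff]
        by_cases hcX : c = X
        · subst hcX; simp
        · rw [if_neg (fun h => hcX h.symm), if_neg hcX, add_zero]
    · rw [if_neg h2]
      have hcX : ¬ c = X := fun h => h2 ((isIn_singleton _ _).mpr (h ▸ hX))
      rw [if_neg hcX, add_zero]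

theorem stepA_getD_mut (X Y : Char) (hX : X ∈ (['A','C','G','T'] : List Char))
    (hY : Y ∈ (['A','C','G','T'] : List Char)) (hne : X ≠ Y)
    (d : PySem.Dict String Int) (p : Char × Char) :
    (pvStepA d p).getD (pvMutKey X Y) 0
      = d.getD (pvMutKey X Y) 0 + (if p = (X, Y) then 1 else 0) := by
  obtain ⟨c, q⟩ := p
  have hXd : X ≠ '-' := by rintro rfl; simp at hX
  unfold pvStepA
  dsimp only
  by_cases h1 : c = '-' ∧ q = '-'
  · rw [if_pos h1]
    obtain ⟨rfl, rfl⟩ := h1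
    rw [if_neg (by simp only [Prod.mk.injEq, not_and]; intro h; exact absurd h.symm hXd),
      add_zero]
  · rw [if_neg h1]
    by_cases h2 : PySem.Chars.isIn [c] "ACGT".toList = true
    · rw [if_pos h2]
      by_cases h3 : PySem.Chars.isIn [q] "ACGT".toList = true ∧ c ≠ q
      · rw [if_pos h3]
        simp only [PySem.Dict.getD_modify, mutKey_eq_consKey_iff, if_false,
          mutKey_eq_mutKey_iff, Prod.mk.injEq]
        by_cases hc : X = c ∧ Y = q
        · obtain ⟨rfl, rfl⟩ := hc; simp
        · rw [if_neg hc, if_neg (fun h : c = X ∧ q = Y => hc ⟨h.1.symm, h.2.symm⟩),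
            add_zero]
      · rw [if_neg h3]
        simp only [PySem.Dict.getD_modify, mutKey_eq_consKey_iff, if_false]
        rw [if_neg, add_zero]
        rintro ⟨rfl, rfl⟩
        exact h3 ⟨(isIn_singleton _ _).mpr hY, hne⟩
    · rw [if_neg h2]
      rw [if_neg, add_zero]
      rintro ⟨rfl, rfl⟩
      exact h2 ((isIn_singleton _ _).mpr hX)

set_option maxRecDepth 8000 in
theorem pvColsLit : pvMonomerMutationColumns =
    ["consensus_A_count", "consensus_G_count", "consensus_C_count", "consensus_T_count",
     "A_to_C","A_to_G","A_to_T","C_to_A","C_to_G","C_to_T",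
     "G_to_A","G_to_C","G_to_T","T_to_A","T_to_C","T_to_G"] := by decide

theorem pvMemCons : ∀ c ∈ (['A','C','G','T'] : List Char),
    pvConsKey c ∈ pvMonomerMutationColumns := by
  have k1 : pvConsKey 'A' = "consensus_A_count" := by decide
  have k2 : pvConsKey 'G' = "consensus_G_count" := by decide
  have k3 : pvConsKey 'C' = "consensus_C_count" := by decide
  have k4 : pvConsKey 'T' = "consensus_T_count" := by decide
  intro c hc
  fin_cases hc <;> rw [pvColsLit] <;> simp [k1, k2, k3, k4]

theorem pvMemMut : ∀ c ∈ (['A','C','G','T'] : List Char), ∀ q ∈ (['A','C','G','T'] : List Char),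
    c ≠ q → pvMutKey c q ∈ pvMonomerMutationColumns := by
  have g1 : pvMutKey 'A' 'C' = "A_to_C" := by decide
  have g2 : pvMutKey 'A' 'G' = "A_to_G" := by decide
  have g3 : pvMutKey 'A' 'T' = "A_to_T" := by decide
  have g4 : pvMutKey 'C' 'A' = "C_to_A" := by decide
  have g5 : pvMutKey 'C' 'G' = "C_to_G" := by decide
  have g6 : pvMutKey 'C' 'T' = "C_to_T" := by decide
  have g7 : pvMutKey 'G' 'A' = "G_to_A" := by decide
  have g8 : pvMutKey 'G' 'C' = "G_to_C" := by decide
  have g9 : pvMutKey 'G' 'T' = "G_to_T" := by decide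
  have g10 : pvMutKey 'T' 'A' = "T_to_A" := by decide
  have g11 : pvMutKey 'T' 'C' = "T_to_C" := by decide
  have g12 : pvMutKey 'T' 'G' = "T_to_G" := by decide
  intro c hc q hq
  fin_cases hc <;> fin_cases hq <;> intro hne <;>
    first
    | exact absurd rfl hne
    | (rw [pvColsLit]; simp [g1, g2, g3, g4, g5, g6, g7, g8, g9, g10, g11, g12])

set_option maxRecDepth 8000 in
theorem pvInitA_keys : pvInitA.keys = pvMonomerMutationColumns := by decide

set_option maxRecDepth 8000 in
theorem pvInitA_getD : ∀ k ∈ pvMonomerMutationColumns, pvInitA.getD k 0 = 0 := by decide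

set_option maxRecDepth 8000 in
theorem pvColsNodup : pvMonomerMutationColumns.Nodup := by decide

theorem stepA_keys (d : PySem.Dict String Int) (p : Char × Char)
    (h : d.keys = pvMonomerMutationColumns) :
    (pvStepA d p).keys = pvMonomerMutationColumns := by
  obtain ⟨c, q⟩ := p
  unfold pvStepA
  dsimp only
  split_ifs with h1 h2 h3
  · exact h
  · have hc := (isIn_singleton _ _).mp h2
    have hq := (isIn_singleton _ _).mp h3.1
    have hk1 : (d.modify (pvConsKey c) 0 (· + 1)).keys = pvMonomerMutationColumns := by
      rw [PySem.Dict.keys_modify, PySem.Dict.keys_insert_of_contains]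
      · exact h
      · rw [PySem.Dict.contains_iff_mem_keys, h]; exact pvMemCons c hc
    rw [PySem.Dict.keys_modify, PySem.Dict.keys_insert_of_contains]
    · exact hk1
    · rw [PySem.Dict.contains_iff_mem_keys, hk1]; exact pvMemMut c hc q hq h3.2
  · have hc := (isIn_singleton _ _).mp h2
    rw [PySem.Dict.keys_modify, PySem.Dict.keys_insert_of_contains]
    · exact h
    · rw [PySem.Dict.contains_iff_mem_keys, h]; exact pvMemCons c hc
  · exact h

theorem foldA_keys : ∀ (L : List (Char × Char)) (d : PySem.Dict String Int),
    d.keys = pvMonomerMutationColumns →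
    (L.foldl pvStepA d).keys = pvMonomerMutationColumns
  | [], _, h => h
  | p :: L, d, h => by
      rw [List.foldl_cons]
      exact foldA_keys L _ (stepA_keys d p h)

theorem foldA_getD_cons (X : Char) (hX : X ∈ (['A','C','G','T'] : List Char)) :
    ∀ (L : List (Char × Char)) (d : PySem.Dict String Int),
    (L.foldl pvStepA d).getD (pvConsKey X) 0
      = d.getD (pvConsKey X) 0 + (L.countP (fun p => p.1 == X) : Int)
  | [], d => by simp
  | p :: L, d => by
      rw [List.foldl_cons, foldA_getD_cons X hX L, stepA_getD_cons X hX]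
      rw [List.countP_cons]
      by_cases h : p.1 = X <;> simp [h] <;> push_cast <;> ring

theorem foldA_getD_mut (X Y : Char) (hX : X ∈ (['A','C','G','T'] : List Char))
    (hY : Y ∈ (['A','C','G','T'] : List Char)) (hne : X ≠ Y) :
    ∀ (L : List (Char × Char)) (d : PySem.Dict String Int),
    (L.foldl pvStepA d).getD (pvMutKey X Y) 0
      = d.getD (pvMutKey X Y) 0 + (List.count (X, Y) L : Int)
  | [], d => by simp
  | p :: L, d => by
      rw [List.foldl_cons, foldA_getD_mut X Y hX hY hne L, stepA_getD_mut X Y hX hY hne]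
      rw [List.count_cons]
      by_cases h : p = (X, Y) <;> simp [h] <;> push_cast <;> ring

theorem A_eq_canon (L : List (Char × Char)) :
    (L.foldl pvStepA pvInitA).items = pvCanon L := by
  have hkeys := foldA_keys L pvInitA pvInitA_keys
  have hnd : (L.foldl pvStepA pvInitA).keys.Nodup := by rw [hkeys]; exact pvColsNodup
  rw [PySem.Dict.items_eq_map_keys _ hnd 0, hkeys]
  have hc : ∀ X, X ∈ (['A','C','G','T'] : List Char) →
      (L.foldl pvStepA pvInitA).getD (pvConsKey X) 0
        = (L.countP (fun p => p.1 == X) : Int) := by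
    intro X hX
    rw [foldA_getD_cons X hX L, pvInitA_getD _ (pvMemCons X hX), zero_add]
  have hm : ∀ X, X ∈ (['A','C','G','T'] : List Char) → ∀ Y, Y ∈ (['A','C','G','T'] : List Char) →
      X ≠ Y →
      (L.foldl pvStepA pvInitA).getD (pvMutKey X Y) 0 = (List.count (X, Y) L : Int) := by
    intro X hX Y hY hne
    rw [foldA_getD_mut X Y hX hY hne L, pvInitA_getD _ (pvMemMut X hX Y hY hne), zero_add]
  have e1 : ("consensus_A_count" : String) = pvConsKey 'A' := by decide
  have e2 : ("consensus_G_count" : String) = pvConsKey 'G' := by decide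
  have e3 : ("consensus_C_count" : String) = pvConsKey 'C' := by decide
  have e4 : ("consensus_T_count" : String) = pvConsKey 'T' := by decide
  have f1 : ("A_to_C" : String) = pvMutKey 'A' 'C' := by decide
  have f2 : ("A_to_G" : String) = pvMutKey 'A' 'G' := by decide
  have f3 : ("A_to_T" : String) = pvMutKey 'A' 'T' := by decide
  have f4 : ("C_to_A" : String) = pvMutKey 'C' 'A' := by decide
  have f5 : ("C_to_G" : String) = pvMutKey 'C' 'G' := by decide
  have f6 : ("C_to_T" : String) = pvMutKey 'C' 'T' := by decide
  have f7 : ("G_to_A" : String) = pvMutKey 'G' 'A' := by decide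
  have f8 : ("G_to_C" : String) = pvMutKey 'G' 'C' := by decide
  have f9 : ("G_to_T" : String) = pvMutKey 'G' 'T' := by decide
  have f10 : ("T_to_A" : String) = pvMutKey 'T' 'A' := by decide
  have f11 : ("T_to_C" : String) = pvMutKey 'T' 'C' := by decide
  have f12 : ("T_to_G" : String) = pvMutKey 'T' 'G' := by decide
  have v1 := hc 'A' (by decide); rw [← e1] at v1
  have v2 := hc 'G' (by decide); rw [← e2] at v2
  have v3 := hc 'C' (by decide); rw [← e3] at v3
  have v4 := hc 'T' (by decide); rw [← e4] at v4
  have w1 := hm 'A' (by decide) 'C' (by decide) (by decide); rw [← f1] at w1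
  have w2 := hm 'A' (by decide) 'G' (by decide) (by decide); rw [← f2] at w2
  have w3 := hm 'A' (by decide) 'T' (by decide) (by decide); rw [← f3] at w3
  have w4 := hm 'C' (by decide) 'A' (by decide) (by decide); rw [← f4] at w4
  have w5 := hm 'C' (by decide) 'G' (by decide) (by decide); rw [← f5] at w5
  have w6 := hm 'C' (by decide) 'T' (by decide) (by decide); rw [← f6] at w6
  have w7 := hm 'G' (by decide) 'A' (by decide) (by decide); rw [← f7] at w7
  have w8 := hm 'G' (by decide) 'C' (by decide) (by decide); rw [← f8] at w8
  have w9 := hm 'G' (by decide) 'T' (by decide) (by decide); rw [← f9] at w9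
  have w10 := hm 'T' (by decide) 'A' (by decide) (by decide); rw [← f10] at w10
  have w11 := hm 'T' (by decide) 'C' (by decide) (by decide); rw [← f11] at w11
  have w12 := hm 'T' (by decide) 'G' (by decide) (by decide); rw [← f12] at w12
  rw [pvColsLit]
  simp only [pvCanon, pvPairs12, List.map_cons, List.map_nil, List.cons_append,
    List.nil_append, ← f1, ← f2, ← f3, ← f4, ← f5, ← f6, ← f7, ← f8, ← f9, ← f10, ← f11, ← f12,
    v1, v2, v3, v4, w1, w2, w3, w4, w5, w6, w7, w8, w9, w10, w11, w12]

-- proof-side abbreviations for B's pieces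
def pvTally (L : List (Char × Char)) : PySem.Dict (Char × Char) Int :=
  L.foldl (fun d pair => d.insert pair (d.getD pair 0 + 1)) PySem.Dict.empty

def pvSumCol (t : PySem.Dict (Char × Char) Int) (x : Char) : Int :=
  ((t.items.filter (fun e => e.1.1 == x)).map (fun e => e.2)).sum

def pvRes1 (t : PySem.Dict (Char × Char) Int) : PySem.Dict String Int :=
  "AGCT".toList.foldl (fun r x => r.insert (pvConsKey x) (pvSumCol t x)) PySem.Dict.empty

def pvRes2 (t : PySem.Dict (Char × Char) Int) : PySem.Dict String Int :=
  "ACGT".toList.foldl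
    (fun r x =>
      "ACGT".toList.foldl
        (fun r y => if x ≠ y then r.insert (pvMutKey x y) (t.getD (x, y) 0) else r) r)
    (pvRes1 t)

theorem res1_items (t : PySem.Dict (Char × Char) Int) :
    (pvRes1 t).items = (['A','G','C','T'] : List Char).map (fun x => (pvConsKey x, pvSumCol t x)) := by
  unfold pvRes1
  rw [show "AGCT".toList = (['A','G','C','T'] : List Char) from rfl]
  rw [PySem.Dict.items_foldl_insert_fresh (['A','G','C','T'] : List Char) pvConsKey
    (fun x => pvSumCol t x) PySem.Dict.empty (fun a _ => by simp [pysem])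
    (by simp [List.nodup_cons, consKey_eq_consKey_iff])]
  simp [show (PySem.Dict.empty : PySem.Dict String Int).items = [] from rfl]

theorem res1_keys (t : PySem.Dict (Char × Char) Int) :
    (pvRes1 t).keys = [pvConsKey 'A', pvConsKey 'G', pvConsKey 'C', pvConsKey 'T'] := by
  simp only [PySem.Dict.keys, res1_items, List.map_cons, List.map_nil]

theorem res2_flat (t : PySem.Dict (Char × Char) Int) :
    pvRes2 t
      = pvPairs12.foldl (fun r p => r.insert (pvMutKey p.1 p.2) (t.getD p 0)) (pvRes1 t) := by
  unfold pvRes2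
  rw [show "ACGT".toList = (['A','C','G','T'] : List Char) from rfl]
  simp [pvPairs12, List.foldl_cons, List.foldl_nil]

theorem res2_items (t : PySem.Dict (Char × Char) Int) :
    (pvRes2 t).items
      = (pvRes1 t).items ++ pvPairs12.map (fun p => (pvMutKey p.1 p.2, t.getD p 0)) := by
  rw [res2_flat]
  refine PySem.Dict.items_foldl_insert_fresh pvPairs12 (fun p => pvMutKey p.1 p.2)
    (fun p => t.getD p 0) (pvRes1 t) ?_ ?_
  · intro p _
    rw [PySem.Dict.contains_eq_decide_mem_keys, res1_keys]
    apply decide_eq_false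
    simp [List.mem_cons, mutKey_eq_consKey_iff]
  · simp [pvPairs12, List.nodup_cons, mutKey_eq_mutKey_iff]

theorem pvCount_beq_irrel (k : Char × Char) (L : List (Char × Char)) :
    List.count k L = @List.count _ instBEqOfDecidableEq k L := by
  induction L with
  | nil => rfl
  | cons p L ih => simp [List.count_cons, ih]

theorem sumFilter_counter (L : List (Char × Char)) (x : Char) :
    pvSumCol (PySem.Dict.counter L) x = (L.countP (fun p => p.1 == x) : Int) := by
  unfold pvSumCol
  rw [PySem.Dict.items_counter, List.filter_map, List.map_map]
  simp only [Function.comp_def]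
  have hperm : List.Perm (PySem.Set.ofList L) L.dedup :=
    (List.perm_ext_iff_of_nodup (PySem.Set.nodup_ofList L) L.nodup_dedup).mpr
      (fun a => by rw [PySem.Set.mem_ofList, List.mem_dedup])
  rw [((hperm.filter _).map _).sum_eq]
  rw [show (fun k : Char × Char => ((List.count k L : Nat) : Int))
        = (Nat.cast ∘ fun k : Char × Char => List.count k L) from rfl]
  rw [← List.map_map, ← Nat.cast_list_sum]
  rw [show (fun k : Char × Char => List.count k L)
        = (fun k : Char × Char => @List.count _ instBEqOfDecidableEq k L) from
      funext fun k => pvCount_beq_irrel k L]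
  exact congrArg Nat.cast (List.sum_map_count_dedup_filter_eq_countP (fun p => p.1 == x) L)

theorem B_eq_canon (L : List (Char × Char)) : (pvRes2 (pvTally L)).items = pvCanon L := by
  have ht : pvTally L = PySem.Dict.counter L :=
    PySem.Dict.foldl_insert_getD_add_one_eq_counter L
  rw [ht, res2_items, res1_items]
  have e1 : ("consensus_A_count" : String) = pvConsKey 'A' := by decide
  have e2 : ("consensus_G_count" : String) = pvConsKey 'G' := by decide
  have e3 : ("consensus_C_count" : String) = pvConsKey 'C' := by decide
  have e4 : ("consensus_T_count" : String) = pvConsKey 'T' := by decide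
  simp only [List.map_cons, List.map_nil, sumFilter_counter, PySem.Dict.getD_counter,
    pvCanon, pvPairs12, List.cons_append, List.nil_append, ← e1, ← e2, ← e3, ← e4]

-- ===== VERDICT (by name: the statement is the Claim_ definition above) =====
theorem count_monomer_mutations_spec : Claim_equal_count_monomer_mutations := by
  intro consensus query _
  unfold Spec_count_monomer_mutations
  show count_monomer_mutations consensus query = count_monomer_mutations_alt consensus query
  have hA : count_monomer_mutations consensus query
      = ((List.zip (PySem.Str.upper consensus).toList (PySem.Str.upper query).toList).foldl
          pvStepA pvInitA).items := rfl
  have hB : count_monomer_mutations_alt consensus query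
      = (pvRes2 (pvTally
          (List.zip (PySem.Str.upper consensus).toList (PySem.Str.upper query).toList))).items := rfl
  rw [hA, hB, A_eq_canon, B_eq_canon]
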